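-- pv_equiv track=rewrite | github.com/bridge25/dt-rag | apps/evaluation/core/golden_dataset.py | _find_exact_duplicates
-- ===== SOURCE A (Python) =====
-- from typing import List, Dict, Any, Optional, Tuple, Set
--
-- def _find_exact_duplicates(texts: List[str]) -> List[Tuple[int, int]]:
--     """Find exact duplicate texts"""
--
--     duplicates = []
--     seen = {}
--
--     for i, text in enumerate(texts):
--         text_clean = text.strip().lower()
--         if text_clean in seen:
--             duplicates.append((seen[text_clean], i))
--         else:
--             seen[text_clean] = i
--
--     return duplicates
-- ===== SOURCE B (Python) =====
-- def _find_exact_duplicates(texts):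
--     """Find exact duplicate texts (two-pass: build first-occurrence index, then emit)."""
--     first = {}
--     for i, text in enumerate(texts):
--         key = text.strip().lower()
--         if key not in first:
--             first[key] = i
--     return [(first[text.strip().lower()], i)
--             for i, text in enumerate(texts)
--             if first[text.strip().lower()] != i]
-- ===== Notes on version B (the rewrite author's own statement) =====
-- stated objective: alternative
-- what changed: Replaces A's single interleaved loop (emit-or-record with a mutable seen dict) by two separate passes: first build the complete first-occurrence index, then a comprehension emits (first_index, i) for every non-first occurrence.
import Mathlib
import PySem

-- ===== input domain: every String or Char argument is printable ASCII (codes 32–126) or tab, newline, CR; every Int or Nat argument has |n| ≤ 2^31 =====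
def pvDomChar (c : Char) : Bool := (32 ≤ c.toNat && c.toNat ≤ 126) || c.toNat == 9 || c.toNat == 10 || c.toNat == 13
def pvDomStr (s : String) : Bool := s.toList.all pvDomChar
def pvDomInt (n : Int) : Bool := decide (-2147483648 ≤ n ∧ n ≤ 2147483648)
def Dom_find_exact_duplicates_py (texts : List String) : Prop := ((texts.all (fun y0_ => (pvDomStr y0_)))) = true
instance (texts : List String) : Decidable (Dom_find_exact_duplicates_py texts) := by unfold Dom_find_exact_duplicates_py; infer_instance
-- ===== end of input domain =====

-- B replaces A's single interleaved loop by two passes (build a first-occurrence index, then emit); same cost, different decomposition.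


-- ===== PORT A =====
def find_exact_duplicates_py (texts : List String) : List (Int × Int) :=
  ((PySem.List.enumerate texts).foldl
    (fun (st : List (Int × Int) × PySem.Dict String Int) p =>
      let tc := PySem.Str.lower (PySem.Str.strip p.2)
      match st.2.get? tc with
      | some j => (st.1 ++ [(j, p.1)], st.2)
      | none => (st.1, st.2.insert tc p.1))
    ([], PySem.Dict.empty)).1

-- ===== PORT B =====
def find_exact_duplicates_py_alt (texts : List String) : List (Int × Int) :=
  let first := (PySem.List.enumerate texts).foldl
    (fun (d : PySem.Dict String Int) p =>
      let key := PySem.Str.lower (PySem.Str.strip p.2)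
      if d.contains key then d else d.insert key p.1)
    PySem.Dict.empty
  -- the comprehension; first[key] is always present (the first pass inserted every key)
  (PySem.List.enumerate texts).filterMap
    (fun p =>
      match first.get? (PySem.Str.lower (PySem.Str.strip p.2)) with
      | some f => if f ≠ p.1 then some (f, p.1) else none
      | none => none)

-- ===== PRECONDITION & SPEC =====
def Spec_find_exact_duplicates_py (texts : List String) (out : List (Int × Int)) : Prop := out = find_exact_duplicates_py_alt texts
instance (texts : List String) (out : List (Int × Int)) : Decidable (Spec_find_exact_duplicates_py texts out) := by unfold Spec_find_exact_duplicates_py; infer_instance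

-- ===== CLAIM (what is proved, stated in full; the proofs are below) =====
def Claim_equal_find_exact_duplicates_py : Prop := ∀ (texts : List String), Dom_find_exact_duplicates_py texts → Spec_find_exact_duplicates_py texts (find_exact_duplicates_py texts)

-- ===== LEMMAS AND PROOFS =====

-- A's interleaved loop, abstracted over the pair list
def pvGen (d : PySem.Dict String Int) : List (Int × String) → List (Int × Int)
  | [] => []
  | p :: rest =>
    match d.get? (PySem.Str.lower (PySem.Str.strip p.2)) with
    | some j => (j, p.1) :: pvGen d rest
    | none => pvGen (d.insert (PySem.Str.lower (PySem.Str.strip p.2)) p.1) rest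

-- B's first pass, abstracted
def pvStepF (d : PySem.Dict String Int) (p : Int × String) : PySem.Dict String Int :=
  let key := PySem.Str.lower (PySem.Str.strip p.2)
  if d.contains key then d else d.insert key p.1

lemma pvFoldF_preserve (l : List (Int × String)) (d : PySem.Dict String Int) (k : String) (v : Int)
    (h : d.get? k = some v) : (l.foldl pvStepF d).get? k = some v := by
  induction l generalizing d with
  | nil => simpa using h
  | cons p rest ih =>
    simp only [List.foldl_cons]
    apply ih
    unfold pvStepF
    by_cases hc : d.contains (PySem.Str.lower (PySem.Str.strip p.2))
    · simpa [hc] using h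
    · have hne : k ≠ PySem.Str.lower (PySem.Str.strip p.2) := by
        intro he
        rw [PySem.Dict.contains_eq_isSome_get?] at hc
        rw [← he, h] at hc
        simp at hc
      simp [hc, PySem.Dict.get?_insert_of_ne _ _ hne, h]

lemma pvFoldA_eq_gen (l : List (Int × String)) (acc : List (Int × Int)) (d : PySem.Dict String Int) :
    (l.foldl
      (fun (st : List (Int × Int) × PySem.Dict String Int) p =>
        let tc := PySem.Str.lower (PySem.Str.strip p.2)
        match st.2.get? tc with
        | some j => (st.1 ++ [(j, p.1)], st.2)
        | none => (st.1, st.2.insert tc p.1))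
      (acc, d)).1 = acc ++ pvGen d l := by
  induction l generalizing acc d with
  | nil => simp [pvGen]
  | cons p rest ih =>
    simp only [List.foldl_cons, pvGen]
    cases h : d.get? (PySem.Str.lower (PySem.Str.strip p.2)) with
    | some j => simp [ih]
    | none => simp [ih]

lemma pvGen_eq_filterMap (l : List (Int × String)) (d : PySem.Dict String Int)
    (hnd : (l.map Prod.fst).Nodup)
    (hv : ∀ k v, d.get? k = some v → v ∉ l.map Prod.fst) :
    pvGen d l = l.filterMap
      (fun p =>
        match (l.foldl pvStepF d).get? (PySem.Str.lower (PySem.Str.strip p.2)) with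
        | some f => if f ≠ p.1 then some (f, p.1) else none
        | none => none) := by
  induction l generalizing d with
  | nil => simp [pvGen]
  | cons p rest ih =>
    have hndt : (rest.map Prod.fst).Nodup := (List.nodup_cons.mp hnd).2
    have hp1 : p.1 ∉ rest.map Prod.fst := (List.nodup_cons.mp hnd).1
    simp only [List.foldl_cons, List.filterMap_cons, pvGen]
    cases h : d.get? (PySem.Str.lower (PySem.Str.strip p.2)) with
    | some j =>
      have hc : d.contains (PySem.Str.lower (PySem.Str.strip p.2)) = true := by
        rw [PySem.Dict.contains_eq_isSome_get?, h]; rfl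
      have hd' : pvStepF d p = d := by simp [pvStepF, hc]
      rw [hd']
      have hD : (rest.foldl pvStepF d).get? (PySem.Str.lower (PySem.Str.strip p.2)) = some j :=
        pvFoldF_preserve rest d _ j h
      have hjne : j ≠ p.1 := by
        intro he
        have := hv _ _ h
        simp [he] at this
      rw [hD]
      simp only [if_pos (by exact hjne)]
      rw [ih d hndt (fun k v hkv => fun hm => hv k v hkv (by simp [hm]))]
    | none =>
      have hc : d.contains (PySem.Str.lower (PySem.Str.strip p.2)) = false := by
        rw [PySem.Dict.contains_eq_isSome_get?, h]; rfl
      have hd' : pvStepF d p = d.insert (PySem.Str.lower (PySem.Str.strip p.2)) p.1 := by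
        simp [pvStepF, hc]
      rw [hd']
      have hD : (rest.foldl pvStepF (d.insert (PySem.Str.lower (PySem.Str.strip p.2)) p.1)).get?
          (PySem.Str.lower (PySem.Str.strip p.2)) = some p.1 :=
        pvFoldF_preserve rest _ _ p.1 (PySem.Dict.get?_insert_self _ _ _)
      rw [hD]
      simp only [ne_eq, not_true_eq_false, if_false]
      rw [ih (d.insert (PySem.Str.lower (PySem.Str.strip p.2)) p.1) hndt ?_]
      intro k v hkv hm
      by_cases he : k = PySem.Str.lower (PySem.Str.strip p.2)
      · subst he
        rw [PySem.Dict.get?_insert_self] at hkv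
        have hvp : v = p.1 := (Option.some_inj.mp hkv).symm
        subst hvp
        exact hp1 hm
      · rw [PySem.Dict.get?_insert_of_ne _ _ he] at hkv
        exact hv k v hkv (by simp [hm])

lemma pvEnum_fst_nodup (texts : List String) :
    ((PySem.List.enumerate texts).map Prod.fst).Nodup := by
  rw [PySem.List.map_fst_enumerate]
  exact PySem.List.nodup_pyRange_one _ _

-- ===== VERDICT (by name: the statement is the Claim_ definition above) =====
theorem find_exact_duplicates_py_spec : Claim_equal_find_exact_duplicates_py := by
  intro texts _
  unfold Spec_find_exact_duplicates_py find_exact_duplicates_py find_exact_duplicates_py_alt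
  rw [pvFoldA_eq_gen]
  rw [pvGen_eq_filterMap _ _ (pvEnum_fst_nodup texts) (by simp [PySem.Dict.get?_empty])]
  rfl
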